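-- pv_equiv track=rewrite | github.com/dinesh-gnapitech/Insite-Full-Load | tools/myworldapp/core/server/base/db/myw_postgis_mvt_query.py | _type_name_as_identifier
-- ===== SOURCE A (Python) =====
-- def _type_name_as_identifier(type_name: str):
--     """Some SQL type names are not valid identifiers, e.g. string(100).
--     Converts the type name into something which is still unique, but valid as a name."""
--
--     # string(100, 200) -> string_100_200
--     replacements = {
--         "(": "_",
--         ",": "_",
--         " ": "",
--         ")": "",
--     }
--
--     for substr, replace_with in replacements.items():
--         type_name = type_name.replace(substr, replace_with)
--     return type_name
-- ===== SOURCE B (Python) =====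
-- def _type_name_as_identifier(type_name: str):
--     """Some SQL type names are not valid identifiers, e.g. string(100).
--     Converts the type name into something which is still unique, but valid as a name."""
--     mapping = {"(": "_", ",": "_", " ": "", ")": ""}
--     out = []
--     for ch in type_name:
--         out.append(mapping.get(ch, ch))
--     return "".join(out)
-- ===== Notes on version B (the rewrite author's own statement) =====
-- stated objective: alternative
-- what changed: Replaces four sequential whole-string .replace scans with one left-to-right pass that maps each character through a fixed table and joins the result.
import Mathlib
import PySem

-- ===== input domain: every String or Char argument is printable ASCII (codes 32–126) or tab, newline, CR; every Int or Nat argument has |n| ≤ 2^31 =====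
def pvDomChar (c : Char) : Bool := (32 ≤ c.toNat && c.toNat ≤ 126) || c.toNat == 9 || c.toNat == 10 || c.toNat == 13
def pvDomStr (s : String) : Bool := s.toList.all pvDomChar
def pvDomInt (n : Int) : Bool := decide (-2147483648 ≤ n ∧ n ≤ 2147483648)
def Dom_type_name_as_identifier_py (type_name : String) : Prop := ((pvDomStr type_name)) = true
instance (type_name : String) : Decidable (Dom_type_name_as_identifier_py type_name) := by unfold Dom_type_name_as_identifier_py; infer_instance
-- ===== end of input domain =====

-- B does the same sanitisation in one left-to-right pass over the characters instead of
-- four sequential whole-string .replace scans (objective: alternative decomposition).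

-- ===== PORT A =====
-- the literal replacements dict, in insertion order
def pvReplacementsA : PySem.Dict String String :=
  PySem.Dict.ofList [("(", "_"), (",", "_"), (" ", ""), (")", "")]

def type_name_as_identifier_py (type_name : String) : String :=
  -- for substr, replace_with in replacements.items(): type_name = type_name.replace(substr, replace_with)
  pvReplacementsA.items.foldl (fun s p => PySem.Str.replace s p.1 p.2) type_name

-- ===== PORT B =====
-- mapping.get(ch, ch) from Source B, as a per-character table (result as the char list it contributes)
def pvMapB (c : Char) : List Char :=
  if c = '(' then ['_']
  else if c = ',' then ['_']
  else if c = ' ' then []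
  else if c = ')' then []
  else [c]

def type_name_as_identifier_py_alt (type_name : String) : String :=
  -- out = []; for ch in type_name: out.append(mapping.get(ch, ch)); return "".join(out)
  String.ofList (type_name.toList.foldl (fun acc c => acc ++ pvMapB c) [])

-- ===== PRECONDITION & SPEC =====
def Spec_type_name_as_identifier_py (type_name : String) (out : String) : Prop := out = type_name_as_identifier_py_alt type_name
instance (type_name : String) (out : String) : Decidable (Spec_type_name_as_identifier_py type_name out) := by unfold Spec_type_name_as_identifier_py; infer_instance

-- ===== CLAIM (what is proved, stated in full; the proofs are below) =====
def Claim_equal_type_name_as_identifier_py : Prop := ∀ (type_name : String), Dom_type_name_as_identifier_py type_name → Spec_type_name_as_identifier_py type_name (type_name_as_identifier_py type_name)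

-- ===== LEMMAS AND PROOFS =====

-- replacing a single-character pattern is a flatMap over the characters
theorem go_single (a : Char) (new : List Char) :
    ∀ (l : List Char) (fuel : Nat) (acc : List Char), l.length ≤ fuel →
      PySem.Chars.replace.go [a] new fuel l acc
        = acc.reverse ++ l.flatMap (fun c => if c = a then new else [c]) := by
  intro l
  induction l with
  | nil =>
      intro fuel acc _
      cases fuel <;> simp [PySem.Chars.replace.go]
  | cons c t ih =>
      intro fuel acc h
      cases fuel with
      | zero => simp at h
      | succ n =>
          have ht : t.length ≤ n := by simpa using h
          by_cases hc : c = a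
          · subst hc
            simp [PySem.Chars.replace.go, List.isPrefixOf, ih _ _ ht]
          · have hac : (a == c) = false := by
              simp only [beq_eq_false_iff_ne]; exact fun e => hc e.symm
            simp [PySem.Chars.replace.go, List.isPrefixOf, hac, ih _ _ ht, hc]

theorem replace_single (a : Char) (new : List Char) (s : List Char) :
    PySem.Chars.replace s [a] new = s.flatMap (fun c => if c = a then new else [c]) := by
  simp [PySem.Chars.replace, go_single a new s s.length [] le_rfl]

-- the four single-character flatMaps compose to B's one-pass table
theorem maps_compose (c : Char) :
    ((if c = '(' then ['_'] else [c]).flatMap fun x =>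
        ((if x = ',' then ['_'] else [x]).flatMap fun y =>
          (if y = ' ' then ([] : List Char) else [y]).flatMap fun z =>
            if z = ')' then ([] : List Char) else [z])) = pvMapB c := by
  by_cases h1 : c = '('
  · simp [h1, pvMapB]
  · by_cases h2 : c = ','
    · simp [h2, pvMapB]
    · by_cases h3 : c = ' '
      · simp [h3, pvMapB]
      · by_cases h4 : c = ')'
        · simp [h4, pvMapB]
        · simp [h1, h2, h3, h4, pvMapB]

theorem pvDictItemsLit :
    pvReplacementsA.items = [("(", "_"), (",", "_"), (" ", ""), (")", "")] := by decide

-- ===== VERDICT (by name: the statement is the Claim_ definition above) =====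
theorem type_name_as_identifier_py_spec : Claim_equal_type_name_as_identifier_py := by
  intro s _
  unfold Spec_type_name_as_identifier_py type_name_as_identifier_py type_name_as_identifier_py_alt
  rw [pvDictItemsLit]
  simp only [List.foldl_cons, List.foldl_nil, PySem.List.foldl_append_eq_flatMap,
    List.nil_append]
  refine String.toList_inj.mp ?_
  simp only [PySem.Str.toList_replace, String.toList_ofList]
  simp only [show "(".toList = ['('] from rfl, show ",".toList = [','] from rfl,
    show " ".toList = [' '] from rfl, show ")".toList = [')'] from rfl,
    show "_".toList = ['_'] from rfl, show "".toList = ([] : List Char) from rfl]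
  simp only [replace_single, List.flatMap_assoc]
  exact List.flatMap_congr (fun c _ => maps_compose c)
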